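-- pv_equiv track=rewrite | github.com/Nasiruddin42/Digital_signal_processing | signal_generate.py | uni_ramp
-- ===== SOURCE A (Python) =====
-- def uni_ramp(shift, n):
--     ramp = []
--     j = 0
--     for i in n:
--         if(i < shift):
--             ramp.append(0)
--         else:
--             ramp.append(j)
--             j+=1
--     return ramp
-- ===== SOURCE B (Python) =====
-- def uni_ramp(shift, n):
--     xs = list(n)
--     mask = [i >= shift for i in xs]
--     pref = []
--     c = 0
--     for m in mask:
--         c += m
--         pref.append(c)
--     return [p - 1 if m else 0 for m, p in zip(mask, pref)]
-- ===== Notes on version B (the rewrite author's own statement) =====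
-- stated objective: alternative
-- what changed: Replaces A's single counter-threaded append loop by a mask table, an inclusive prefix-count pass, and a separate zip-based emission pass (prefix count minus one at qualifying positions).
import Mathlib
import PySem

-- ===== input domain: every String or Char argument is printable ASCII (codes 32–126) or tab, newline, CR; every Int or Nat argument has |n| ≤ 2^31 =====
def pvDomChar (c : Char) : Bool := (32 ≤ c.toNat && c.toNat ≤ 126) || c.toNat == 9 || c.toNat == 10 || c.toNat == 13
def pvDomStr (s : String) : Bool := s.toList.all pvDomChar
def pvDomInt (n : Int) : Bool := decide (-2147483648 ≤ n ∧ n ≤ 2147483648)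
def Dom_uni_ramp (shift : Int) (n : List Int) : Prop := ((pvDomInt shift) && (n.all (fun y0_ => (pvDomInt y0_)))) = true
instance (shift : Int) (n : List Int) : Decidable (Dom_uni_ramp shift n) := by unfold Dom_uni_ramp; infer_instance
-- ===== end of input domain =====

-- B replaces A's counter-threaded append loop with a mask table, a prefix-count pass and a zip emission pass (alternative decomposition, same cost).


-- ===== PORT A =====
-- A: one loop threading (ramp, j); append 0 when i < shift, else append j and bump j.
def uni_ramp (shift : Int) (n : List Int) : List Int :=
  (n.foldl (fun (st : List Int × Int) i =>
      if i < shift then (st.1 ++ [0], st.2)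
      else (st.1 ++ [st.2], st.2 + 1)) ([], 0)).1

-- ===== PORT B =====
-- B: mask pass, inclusive prefix-count pass, zip emission pass.
def uni_ramp_alt (shift : Int) (n : List Int) : List Int :=
  let mask := n.map (fun i => decide (shift ≤ i))
  let pref := (mask.foldl (fun (st : List Int × Int) m =>
      let c := st.2 + (if m then 1 else 0)
      (st.1 ++ [c], c)) ([], 0)).1
  (List.zip mask pref).map (fun mp => if mp.1 = true then mp.2 - 1 else 0)

-- ===== PRECONDITION & SPEC =====
def Spec_uni_ramp (shift : Int) (n : List Int) (out : List Int) : Prop := out = uni_ramp_alt shift n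
instance (shift : Int) (n : List Int) (out : List Int) : Decidable (Spec_uni_ramp shift n out) := by unfold Spec_uni_ramp; infer_instance

-- ===== CLAIM (what is proved, stated in full; the proofs are below) =====
def Claim_equal_uni_ramp : Prop := ∀ (shift : Int) (n : List Int), Dom_uni_ramp shift n → Spec_uni_ramp shift n (uni_ramp shift n)

-- ===== LEMMAS AND PROOFS =====

-- reference recursion: the ramp emitted starting from counter j
def ramped (shift : Int) (j : Int) : List Int → List Int
  | [] => []
  | i :: t => if i < shift then 0 :: ramped shift j t else j :: ramped shift (j + 1) t

-- inclusive prefix counts of a boolean list starting from c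
def prefs (c : Int) : List Bool → List Int
  | [] => []
  | m :: t => (c + (if m then 1 else 0)) :: prefs (c + (if m then 1 else 0)) t

theorem uni_ramp_foldl (shift : Int) (n : List Int) (acc : List Int) (j : Int) :
    (n.foldl (fun (st : List Int × Int) i =>
      if i < shift then (st.1 ++ [0], st.2)
      else (st.1 ++ [st.2], st.2 + 1)) (acc, j)).1 = acc ++ ramped shift j n := by
  induction n generalizing acc j with
  | nil => simp [ramped]
  | cons i t ih =>
    simp only [List.foldl, ramped]
    by_cases h : i < shift <;> simp [h, ih, List.append_assoc]

theorem prefs_foldl (mask : List Bool) (acc : List Int) (c : Int) :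
    (mask.foldl (fun (st : List Int × Int) m =>
      let c := st.2 + (if m then 1 else 0)
      (st.1 ++ [c], c)) (acc, c)).1 = acc ++ prefs c mask := by
  induction mask generalizing acc c with
  | nil => simp [prefs]
  | cons m t ih => simp [List.foldl, prefs, ih, List.append_assoc]

theorem zip_emit (shift : Int) (n : List Int) (c : Int) :
    (List.zip (n.map (fun i => decide (shift ≤ i))) (prefs c (n.map (fun i => decide (shift ≤ i))))).map
      (fun mp => if mp.1 = true then mp.2 - 1 else 0) = ramped shift c n := by
  induction n generalizing c with
  | nil => simp [prefs, ramped]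
  | cons i t ih =>
    simp only [List.map, prefs, List.zip_cons_cons, ramped]
    by_cases h : i < shift
    · have hm : ¬ shift ≤ i := by omega
      simp [hm, ih]
    · have hm : shift ≤ i := by omega
      have : c + 1 - 1 = c := by ring
      simp [hm, ih, this]

-- ===== VERDICT (by name: the statement is the Claim_ definition above) =====
theorem uni_ramp_spec : Claim_equal_uni_ramp := by
  intro shift n _
  show uni_ramp shift n = uni_ramp_alt shift n
  simp only [uni_ramp, uni_ramp_alt]
  rw [uni_ramp_foldl, prefs_foldl]
  simp only [List.nil_append]
  rw [zip_emit]
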